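-- pv_equiv track=rewrite | github.com/triplebob/emis-xml-convertor | util_modules/ui/ui_tabs.py | _deduplicate_clinical_data_by_emis_guid
-- ===== SOURCE A (Python) =====
-- def _deduplicate_clinical_data_by_emis_guid(clinical_data):
--     """
--     Deduplicate clinical data by EMIS GUID, prioritizing entries with actual ValueSet GUID over N/A
--     This mirrors the deduplication logic in the export handler
--
--     Args:
--         clinical_data: List of clinical code dictionaries
--
--     Returns:
--         List of deduplicated clinical codes
--     """
--     if not clinical_data:
--         return clinical_data
--
--     # Group codes by EMIS GUID
--     emis_guid_groups = {}
--     for code in clinical_data: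
--         emis_guid = code.get('EMIS GUID', 'unknown')
--         if emis_guid not in emis_guid_groups:
--             emis_guid_groups[emis_guid] = []
--         emis_guid_groups[emis_guid].append(code)
--
--     # For each group, select the best entry
--     deduplicated_codes = []
--     for emis_guid, codes_group in emis_guid_groups.items():
--         if len(codes_group) == 1:
--             # Only one entry, keep it
--             deduplicated_codes.append(codes_group[0])
--         else:
--             # Multiple entries, select the best one
--             best_code = _select_best_clinical_code_entry(codes_group)
--             deduplicated_codes.append(best_code)
--
--     return deduplicated_codes
--
-- def _select_best_clinical_code_entry(codes_group):
--     """
--     Select the best clinical code entry from a group of duplicates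
--
--     Priority:
--     1. Has actual ValueSet GUID (not N/A)
--     2. Has ValueSet Description (not N/A)
--     3. Has SNOMED Description (not N/A)
--     4. Has Table/Column Context
--     """
--     def calculate_completeness_score(entry):
--         score = 0
--
--         # ValueSet GUID - HIGHEST priority (actual GUID vs N/A)
--         vs_guid = entry.get('ValueSet GUID', 'N/A')
--         if vs_guid and vs_guid != 'N/A' and vs_guid.strip():
--             score += 20  # Highest priority for actual ValueSet GUID
--
--         # ValueSet Description - high priority
--         vs_desc = entry.get('ValueSet Description', 'N/A')
--         if vs_desc and vs_desc != 'N/A' and vs_desc.strip():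
--             score += 10
--
--         # SNOMED Description - medium priority
--         snomed_desc = entry.get('SNOMED Description', 'N/A')
--         if snomed_desc and snomed_desc != 'N/A' and snomed_desc != 'No display name in XML' and snomed_desc.strip():
--             score += 5
--
--         # Table Context - lower priority
--         table_ctx = entry.get('Table Context', 'N/A')
--         if table_ctx and table_ctx != 'N/A' and table_ctx.strip():
--             score += 2
--
--         # Column Context - lowest priority
--         col_ctx = entry.get('Column Context', 'N/A')
--         if col_ctx and col_ctx != 'N/A' and col_ctx.strip():
--             score += 1
--
--         return score
--
--     # Find the entry with the highest completeness score
--     best_entry = codes_group[0]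
--     best_score = calculate_completeness_score(best_entry)
--
--     for entry in codes_group[1:]:
--         entry_score = calculate_completeness_score(entry)
--         if entry_score > best_score:
--             best_entry = entry
--             best_score = entry_score
--
--     return best_entry
-- ===== SOURCE B (Python) =====
-- def _completeness_score(entry):
--     """Completeness score used to pick the best duplicate (same rules as the export handler)."""
--     score = 0
--     vs_guid = entry.get('ValueSet GUID', 'N/A')
--     if vs_guid and vs_guid != 'N/A' and vs_guid.strip():
--         score += 20
--     vs_desc = entry.get('ValueSet Description', 'N/A')
--     if vs_desc and vs_desc != 'N/A' and vs_desc.strip():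
--         score += 10
--     snomed_desc = entry.get('SNOMED Description', 'N/A')
--     if snomed_desc and snomed_desc != 'N/A' and snomed_desc != 'No display name in XML' and snomed_desc.strip():
--         score += 5
--     table_ctx = entry.get('Table Context', 'N/A')
--     if table_ctx and table_ctx != 'N/A' and table_ctx.strip():
--         score += 2
--     col_ctx = entry.get('Column Context', 'N/A')
--     if col_ctx and col_ctx != 'N/A' and col_ctx.strip():
--         score += 1
--     return score
--
--
-- def _deduplicate_clinical_data_by_emis_guid(clinical_data):
--     """Single pass: keep, per EMIS GUID, the current best entry (earlier entry wins ties)."""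
--     if not clinical_data:
--         return clinical_data
--     best_by_guid = {}
--     for code in clinical_data:
--         guid = code.get('EMIS GUID', 'unknown')
--         if guid not in best_by_guid:
--             best_by_guid[guid] = code
--         elif _completeness_score(code) > _completeness_score(best_by_guid[guid]):
--             best_by_guid[guid] = code
--     return list(best_by_guid.values())
-- ===== Notes on version B (the rewrite author's own statement) =====
-- stated objective: simpler
-- what changed: Replaced the two-phase group-then-select pipeline (build a dict of per-GUID lists, then re-scan each group for its best-scoring entry) with a single pass keeping only the current best entry per GUID in a dict, replacing on strictly greater score so earlier entries win ties.
import Mathlib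
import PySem

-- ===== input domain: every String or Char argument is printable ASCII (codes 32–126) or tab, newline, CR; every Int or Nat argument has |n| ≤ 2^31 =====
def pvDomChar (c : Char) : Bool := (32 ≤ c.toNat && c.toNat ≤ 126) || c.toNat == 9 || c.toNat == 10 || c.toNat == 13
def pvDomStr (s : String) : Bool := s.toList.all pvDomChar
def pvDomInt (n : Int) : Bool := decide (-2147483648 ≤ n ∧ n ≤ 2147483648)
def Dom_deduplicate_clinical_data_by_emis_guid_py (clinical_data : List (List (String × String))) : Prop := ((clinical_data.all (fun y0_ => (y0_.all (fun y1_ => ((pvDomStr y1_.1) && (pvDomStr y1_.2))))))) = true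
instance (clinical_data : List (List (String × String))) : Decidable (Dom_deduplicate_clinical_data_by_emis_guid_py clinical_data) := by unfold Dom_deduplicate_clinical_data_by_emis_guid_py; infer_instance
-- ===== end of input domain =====

-- B replaces A's two-phase group-then-select pipeline by a single pass keeping, per EMIS GUID,
-- the current best entry (strict-> replacement so earlier entries win ties); objective: simpler.

-- ===== PORT A =====

-- dict.get(k, dflt) on a code dictionary (first-match association-list lookup)
def pvGet (c : List (String × String)) (k dflt : String) : String :=
  (PySem.Dict.mk c).getD k dflt

-- truthy-and-not-'N/A'-and-nonblank test shared by every field of calculate_completeness_score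
def pvFieldOk (s : String) : Bool :=
  (s != "") && (s != "N/A") && (PySem.Str.strip s != "")

-- calculate_completeness_score (identical scoring code in A and in B's _completeness_score)
def pvScore (e : List (String × String)) : Int :=
  (if pvFieldOk (pvGet e "ValueSet GUID" "N/A") then 20 else 0)
  + (if pvFieldOk (pvGet e "ValueSet Description" "N/A") then 10 else 0)
  + (if (pvFieldOk (pvGet e "SNOMED Description" "N/A")
          && (pvGet e "SNOMED Description" "N/A" != "No display name in XML")) then 5 else 0)
  + (if pvFieldOk (pvGet e "Table Context" "N/A") then 2 else 0)
  + (if pvFieldOk (pvGet e "Column Context" "N/A") then 1 else 0)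

-- _select_best_clinical_code_entry: best_entry = codes_group[0], then scan codes_group[1:];
-- the [] case is unreachable (A only calls it on nonempty groups)
def pvSelectBest (g : List (List (String × String))) : List (String × String) :=
  match g with
  | [] => []
  | c :: rest => rest.foldl (fun best e => if pvScore e > pvScore best then e else best) c

def deduplicate_clinical_data_by_emis_guid_py (clinical_data : List (List (String × String))) : List (List (String × String)) :=
  if clinical_data.isEmpty then clinical_data
  else
    let groups := clinical_data.foldl (fun d code =>
      let g := pvGet code "EMIS GUID" "unknown"
      let d := if d.contains g then d else d.insert g ([] : List (List (String × String)))
      d.modify g [] (fun l => l ++ [code])) PySem.Dict.empty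
    groups.items.foldl (fun acc p =>
      if p.2.length = 1 then acc ++ [p.2.headD []]
      else acc ++ [pvSelectBest p.2]) []

-- ===== PORT B =====
def deduplicate_clinical_data_by_emis_guid_py_alt (clinical_data : List (List (String × String))) : List (List (String × String)) :=
  if clinical_data.isEmpty then clinical_data
  else
    (clinical_data.foldl (fun b code =>
      let g := pvGet code "EMIS GUID" "unknown"
      match b.get? g with
      | none => b.insert g code
      | some inc => if pvScore code > pvScore inc then b.insert g code else b)
      PySem.Dict.empty).values

-- ===== PRECONDITION & SPEC =====
def Spec_deduplicate_clinical_data_by_emis_guid_py (clinical_data : List (List (String × String))) (out : List (List (String × String))) : Prop := out = deduplicate_clinical_data_by_emis_guid_py_alt clinical_data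
instance (clinical_data : List (List (String × String))) (out : List (List (String × String))) : Decidable (Spec_deduplicate_clinical_data_by_emis_guid_py clinical_data out) := by unfold Spec_deduplicate_clinical_data_by_emis_guid_py; infer_instance

-- ===== CLAIM (what is proved, stated in full; the proofs are below) =====
def Claim_equal_deduplicate_clinical_data_by_emis_guid_py : Prop := ∀ (clinical_data : List (List (String × String))), Dom_deduplicate_clinical_data_by_emis_guid_py clinical_data → Spec_deduplicate_clinical_data_by_emis_guid_py clinical_data (deduplicate_clinical_data_by_emis_guid_py clinical_data)

-- ===== LEMMAS AND PROOFS =====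

-- abbreviations used only by the proofs
def pvF (p : String × List (List (String × String))) : String × List (String × String) :=
  (p.1, pvSelectBest p.2)

lemma pvSelectBest_append (c0 : List (String × String)) (rest : List (List (String × String)))
    (c : List (String × String)) :
    pvSelectBest (c0 :: (rest ++ [c]))
      = if pvScore c > pvScore (pvSelectBest (c0 :: rest)) then c else pvSelectBest (c0 :: rest) := by
  simp [pvSelectBest, List.foldl_append]

lemma pvGetQ (b : PySem.Dict String (List (String × String)))
    (d : PySem.Dict String (List (List (String × String))))
    (hb : b.items = d.items.map pvF) (g : String) :
    b.get? g = (d.get? g).map (fun l => pvSelectBest l) := by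
  simp only [PySem.Dict.get?, hb, List.find?_map]
  have : ((fun p : String × List (String × String) => p.1 == g) ∘ pvF)
      = (fun p : String × List (List (String × String)) => p.1 == g) := by
    funext p; simp [pvF]
  rw [this]
  cases List.find? (fun p => p.1 == g) d.items with
  | none => simp
  | some p => simp [pvF]

-- one step of the two loops preserves the invariant
lemma pvStep (c : List (String × String))
    (d : PySem.Dict String (List (List (String × String))))
    (b : PySem.Dict String (List (String × String)))
    (hb : b.items = d.items.map pvF)
    (hnd : d.keys.Nodup)
    (hne : ∀ p ∈ d.items, p.2 ≠ ([] : List (List (String × String)))) :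
    let g := pvGet c "EMIS GUID" "unknown"
    let d' := (if d.contains g then d else d.insert g ([] : List (List (String × String)))).modify g [] (fun l => l ++ [c])
    let b' := match b.get? g with
      | none => b.insert g c
      | some inc => if pvScore c > pvScore inc then b.insert g c else b
    b'.items = d'.items.map pvF ∧ d'.keys.Nodup ∧ ∀ p ∈ d'.items, p.2 ≠ [] := by
  intro g d' b'
  by_cases hcont : d.contains g = true
  · -- key already present: A appends to the group, B compares scores
    obtain ⟨gl, hgl⟩ : ∃ gl, d.get? g = some gl := by
      cases h : d.get? g with
      | none => rw [PySem.Dict.get?_eq_none_iff_contains] at h; simp [h] at hcont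
      | some gl => exact ⟨gl, rfl⟩
    have hmem : (g, gl) ∈ d.items := PySem.Dict.mem_items_of_get?_eq_some d hgl
    have hglne : gl ≠ [] := hne _ hmem
    obtain ⟨c0, rest, rfl⟩ : ∃ c0 rest, gl = c0 :: rest := by
      cases gl with
      | nil => exact absurd rfl hglne
      | cons c0 rest => exact ⟨c0, rest, rfl⟩
    have hbq : b.get? g = some (pvSelectBest (c0 :: rest)) := by
      rw [pvGetQ b d hb g, hgl]; rfl
    have hd' : d' = d.insert g ((c0 :: rest) ++ [c]) := by
      simp only [d', hcont, if_true, PySem.Dict.modify,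
        PySem.Dict.getD_eq_get?_getD, hgl, Option.getD_some]
    have hbcont : b.contains g = true := by
      rw [PySem.Dict.contains_eq_isSome_get?, hbq]; rfl
    -- the value stored at any item whose key is g is (c0 :: rest)
    have hval : ∀ p ∈ d.items, p.1 = g → p.2 = c0 :: rest := by
      intro p hp hpg
      have := PySem.Dict.get?_of_mem_items d (show (p.1, p.2) ∈ d.items from hp) hnd
      rw [hpg, hgl] at this
      exact (Option.some.inj this).symm
    refine ⟨?_, ?_, ?_⟩
    · -- items relation
      rw [hd', PySem.Dict.items_insert_of_contains d _ hcont]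
      simp only [b']
      rw [hbq]
      by_cases hsc : pvScore c > pvScore (pvSelectBest (c0 :: rest))
      · simp only [hsc, if_true]
        rw [PySem.Dict.items_insert_of_contains b _ hbcont, hb,
          List.map_map, List.map_map]
        apply List.map_congr_left
        intro p hp
        by_cases hpg : p.1 = g
        · simp [Function.comp, pvF, hpg, pvSelectBest_append, hsc]
        · simp [Function.comp, pvF, hpg]
      · simp only [hsc, if_false]
        rw [hb, List.map_map]
        apply List.map_congr_left
        intro p hp
        by_cases hpg : p.1 = g
        · have := hval p hp hpg
          simp [Function.comp, pvF, hpg, pvSelectBest_append, hsc, this]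
        · simp [Function.comp, pvF, hpg]
    · rw [hd']; exact PySem.Dict.nodup_keys_insert d _ _ hnd
    · rw [hd', PySem.Dict.items_insert_of_contains d _ hcont]
      intro p hp
      obtain ⟨q, hq, rfl⟩ := List.mem_map.mp hp
      by_cases hqg : q.1 = g
      · simp [hqg]
      · simpa [hqg] using hne q hq
  · -- fresh key: both sides append a new item
    have hcont' : d.contains g = false := by revert hcont; cases d.contains g <;> simp
    have hdq : d.get? g = none := (PySem.Dict.get?_eq_none_iff_contains d g).mpr hcont'
    have hbq : b.get? g = none := by rw [pvGetQ b d hb g, hdq]; rfl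
    have hd' : d' = d.insert g [c] := by
      simp only [d', hcont', Bool.false_eq_true, if_false, PySem.Dict.modify,
        PySem.Dict.getD_insert_self, PySem.Dict.insert_insert_self, List.nil_append]
    have hbcont : b.contains g = false := by
      rw [PySem.Dict.contains_eq_isSome_get?, hbq]; rfl
    refine ⟨?_, ?_, ?_⟩
    · simp only [b', hbq]
      rw [hd', PySem.Dict.items_insert_of_not_contains d _ hcont',
        PySem.Dict.items_insert_of_not_contains b _ hbcont, hb, List.map_append]
      rfl
    · rw [hd']; exact PySem.Dict.nodup_keys_insert d _ _ hnd
    · rw [hd', PySem.Dict.items_insert_of_not_contains d _ hcont']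
      intro p hp
      rcases List.mem_append.mp hp with h | h
      · exact hne p h
      · simp at h; subst h; simp

-- the full loops preserve the invariant
lemma pvLoop (l : List (List (String × String)))
    (d : PySem.Dict String (List (List (String × String))))
    (b : PySem.Dict String (List (String × String)))
    (hb : b.items = d.items.map pvF)
    (hnd : d.keys.Nodup)
    (hne : ∀ p ∈ d.items, p.2 ≠ ([] : List (List (String × String)))) :
    let D := l.foldl (fun d code =>
      let g := pvGet code "EMIS GUID" "unknown"
      let d := if d.contains g then d else d.insert g ([] : List (List (String × String)))
      d.modify g [] (fun l => l ++ [code])) d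
    let B := l.foldl (fun b code =>
      let g := pvGet code "EMIS GUID" "unknown"
      match b.get? g with
      | none => b.insert g code
      | some inc => if pvScore code > pvScore inc then b.insert g code else b) b
    B.items = D.items.map pvF ∧ D.keys.Nodup ∧ ∀ p ∈ D.items, p.2 ≠ [] := by
  induction l generalizing d b with
  | nil => intro D B; exact ⟨hb, hnd, hne⟩
  | cons c rest ih =>
    intro D B
    obtain ⟨h1, h2, h3⟩ := pvStep c d b hb hnd hne
    exact ih _ _ h1 h2 h3

-- ===== VERDICT (by name: the statement is the Claim_ definition above) =====
theorem deduplicate_clinical_data_by_emis_guid_py_spec : Claim_equal_deduplicate_clinical_data_by_emis_guid_py := by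
  intro cd _
  show deduplicate_clinical_data_by_emis_guid_py cd = deduplicate_clinical_data_by_emis_guid_py_alt cd
  unfold deduplicate_clinical_data_by_emis_guid_py deduplicate_clinical_data_by_emis_guid_py_alt
  by_cases hcd : cd.isEmpty
  · simp [hcd]
  · simp only [hcd, Bool.false_eq_true, if_false]
    obtain ⟨hitems, hnd, hne⟩ := pvLoop cd PySem.Dict.empty PySem.Dict.empty rfl (by simp) (by simp [PySem.Dict.empty])
    -- rewrite A's output loop into a map over the grouped items
    have hA : ∀ (items : List (String × List (List (String × String)))),
        items.foldl (fun acc p =>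
          if p.2.length = 1 then acc ++ [p.2.headD []]
          else acc ++ [pvSelectBest p.2]) []
        = items.map (fun p => if p.2.length = 1 then p.2.headD [] else pvSelectBest p.2) := by
      intro items
      have : (fun (acc : List (List (String × String))) (p : String × List (List (String × String))) =>
          if p.2.length = 1 then acc ++ [p.2.headD []] else acc ++ [pvSelectBest p.2])
          = fun acc p => acc ++ [if p.2.length = 1 then p.2.headD [] else pvSelectBest p.2] := by
        funext acc p; split <;> rfl
      rw [this, PySem.List.foldl_append_singleton_eq_map]; rfl
    rw [hA]
    simp only [PySem.Dict.values, hitems, List.map_map]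
    apply List.map_congr_left
    intro p hp
    have hpne := hne p hp
    match h : p.2 with
    | [] => exact absurd h hpne
    | [c0] => simp [pvF, pvSelectBest, h]
    | c0 :: c1 :: rest => simp [pvF, h]
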